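-- pv_equiv track=rewrite | github.com/4p3/MIT--Computer-Science-and-Programming--python-3- | ps3d.py | constrainedMatchPair
-- ===== SOURCE A (Python) =====
-- def constrainedMatchPair(firstMatch,secondMatch,length):
-- 	if not isinstance(firstMatch, tuple) or not isinstance(secondMatch, tuple) or not isinstance(length, int):
-- 		return None
-- 	else:
-- 		ans = ()
-- 		for n in firstMatch:
-- 			for k in secondMatch:
-- 				if length + n + 1 == k:
-- 					ans += (n,)
-- 		return ans
-- ===== SOURCE B (Python) =====
-- def _bisect_left(a, x):
--     lo, hi = 0, len(a)
--     while lo < hi: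
--         mid = (lo + hi) // 2
--         if a[mid] < x:
--             lo = mid + 1
--         else:
--             hi = mid
--     return lo
--
-- def _bisect_right(a, x):
--     lo, hi = 0, len(a)
--     while lo < hi:
--         mid = (lo + hi) // 2
--         if x < a[mid]:
--             hi = mid
--         else:
--             lo = mid + 1
--     return lo
--
-- def constrainedMatchPair(firstMatch, secondMatch, length):
--     if not isinstance(firstMatch, tuple) or not isinstance(secondMatch, tuple) or not isinstance(length, int):
--         return None
--     srt = sorted(secondMatch)
--     ans = []
--     for n in firstMatch:
--         t = length + n + 1
--         ans += [n] * (_bisect_right(srt, t) - _bisect_left(srt, t))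
--     return tuple(ans)
-- ===== Notes on version B (the rewrite author's own statement) =====
-- stated objective: faster
-- what changed: Replaced A's inner linear scan of secondMatch for every n by sorting secondMatch once and counting each target length+n+1 with two binary searches (bisect_right - bisect_left).
import Mathlib
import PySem

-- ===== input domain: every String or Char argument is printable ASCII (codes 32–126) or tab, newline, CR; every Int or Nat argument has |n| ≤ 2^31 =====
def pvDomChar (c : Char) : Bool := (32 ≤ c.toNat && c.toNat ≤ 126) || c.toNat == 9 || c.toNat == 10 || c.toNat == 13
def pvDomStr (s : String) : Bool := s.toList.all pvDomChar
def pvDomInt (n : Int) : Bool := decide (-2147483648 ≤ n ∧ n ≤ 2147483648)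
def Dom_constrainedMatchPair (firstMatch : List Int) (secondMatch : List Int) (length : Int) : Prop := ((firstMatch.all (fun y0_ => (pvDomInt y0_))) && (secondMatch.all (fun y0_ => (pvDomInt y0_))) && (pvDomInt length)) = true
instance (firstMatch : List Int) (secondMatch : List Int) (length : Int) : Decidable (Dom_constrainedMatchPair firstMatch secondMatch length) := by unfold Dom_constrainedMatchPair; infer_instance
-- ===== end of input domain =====

-- B sorts secondMatch once and counts each target length+n+1 with two binary searches
-- (bisect_right - bisect_left), replacing A's inner linear scan per n (objective: faster).

-- ===== PORT A =====
-- (the isinstance guard cannot fire under the type convention: arguments are tuples/int by type)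
def constrainedMatchPair (firstMatch : List Int) (secondMatch : List Int) (length : Int) : List Int :=
  firstMatch.foldl (fun ans n =>
    secondMatch.foldl (fun ans k => if length + n + 1 == k then ans ++ [n] else ans) ans) []

-- ===== PORT B =====
-- Source B's hand-written _bisect_left/_bisect_right are exactly Python's bisect algorithm,
-- ported as PySem.List.bisectLeft / bisectRight; sorted(secondMatch) is PySem.List.sorted.
def constrainedMatchPair_alt (firstMatch : List Int) (secondMatch : List Int) (length : Int) : List Int :=
  let srt := PySem.List.sorted secondMatch (fun x => x)
  firstMatch.foldl (fun ans n =>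
    let t := length + n + 1
    ans ++ List.replicate (PySem.List.bisectRight srt t - PySem.List.bisectLeft srt t) n) []

-- ===== PRECONDITION & SPEC =====
def Spec_constrainedMatchPair (firstMatch : List Int) (secondMatch : List Int) (length : Int) (out : List Int) : Prop := out = constrainedMatchPair_alt firstMatch secondMatch length
instance (firstMatch : List Int) (secondMatch : List Int) (length : Int) (out : List Int) : Decidable (Spec_constrainedMatchPair firstMatch secondMatch length out) := by unfold Spec_constrainedMatchPair; infer_instance

-- ===== CLAIM (what is proved, stated in full; the proofs are below) =====
def Claim_equal_constrainedMatchPair : Prop := ∀ (firstMatch : List Int) (secondMatch : List Int) (length : Int), Dom_constrainedMatchPair firstMatch secondMatch length → Spec_constrainedMatchPair firstMatch secondMatch length (constrainedMatchPair firstMatch secondMatch length)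

-- ===== LEMMAS AND PROOFS =====

-- A's inner scan over secondMatch appends n once per occurrence of length+n+1.
theorem inner_scan_eq_replicate (s : List Int) (t n : Int) (ans : List Int) :
    s.foldl (fun ans k => if t == k then ans ++ [n] else ans) ans
      = ans ++ List.replicate (s.count t) n := by
  induction s generalizing ans with
  | nil => simp
  | cons k s ih =>
    simp only [List.foldl_cons, List.count_cons, ih]
    by_cases h : t = k
    · simp only [h, beq_self_eq_true, if_true]
      simp [List.replicate_succ]
    · simp [h, Ne.symm h, beq_iff_eq]

theorem foldl_step_congr {α β : Type} (l : List β) (f g : α → β → α) (init : α)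
    (h : ∀ a b, b ∈ l → f a b = g a b) : l.foldl f init = l.foldl g init := by
  induction l generalizing init with
  | nil => rfl
  | cons x xs ih =>
    simp only [List.foldl_cons, h init x (List.mem_cons_self ..)]
    exact ih _ (fun a b hb => h a b (List.mem_cons_of_mem _ hb))

-- If the occurrences of t in s are exactly the index window [L, R), then s.count t = R - L.
theorem count_eq_of_window (s : List Int) (t : Int) (L R : Nat)
    (hLR : L ≤ R) (hR : R ≤ s.length)
    (h : ∀ j (hj : j < s.length), s[j] = t ↔ (L ≤ j ∧ j < R)) :
    s.count t = R - L := by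
  induction s generalizing L R with
  | nil =>
    simp only [List.length_nil] at hR
    simp only [List.count_nil]
    omega
  | cons a s ih =>
    have hshift : ∀ j (hj : j < s.length), s[j] = t ↔ (L ≤ j + 1 ∧ j + 1 < R) := by
      intro j hj
      simpa using h (j + 1) (by simpa using Nat.succ_lt_succ hj)
    have ha : a = t ↔ (L ≤ 0 ∧ 0 < R) := by simpa using h 0 (by simp)
    simp only [List.length_cons] at hR
    by_cases hat : a = t
    · obtain ⟨h1, h2⟩ := ha.mp hat
      have hcount : s.count t = (R - 1) - 0 :=
        ih 0 (R - 1) (by omega) (by omega)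
          (fun j hj => by rw [hshift j hj]; omega)
      simp [List.count_cons, beq_iff_eq, hat, hcount]
      omega
    · have hnot : ¬ (L ≤ 0 ∧ 0 < R) := fun hc => hat (ha.mpr hc)
      have hne : t ≠ a := fun hc => hat hc.symm
      have hcount : s.count t = (R - 1) - (L - 1) :=
        ih (L - 1) (R - 1) (by omega) (by omega)
          (fun j hj => by rw [hshift j hj]; omega)
      simp [List.count_cons, beq_iff_eq, hat, hne, hcount]
      omega

-- Binary-search difference on the sorted copy = multiplicity of t in secondMatch.
theorem bisect_diff_eq_count (s : List Int) (t : Int) :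
    PySem.List.bisectRight (PySem.List.sorted s (fun x => x)) t
      - PySem.List.bisectLeft (PySem.List.sorted s (fun x => x)) t
      = s.count t := by
  set srt := PySem.List.sorted s (fun x => x) with hsrt
  have hpw : List.Pairwise (fun a b => a ≤ b) srt := by
    simpa using PySem.List.sorted_pairwise s (fun x => x)
  obtain ⟨hL_le, hL_lt, hL_ge⟩ := PySem.List.bisectLeft_spec srt t hpw
  obtain ⟨hR_le, hR_lt, hR_ge⟩ := PySem.List.bisectRight_spec srt t hpw
  set L := PySem.List.bisectLeft srt t
  set R := PySem.List.bisectRight srt t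
  have hLR : L ≤ R := by
    by_contra hc
    push_neg at hc
    have hRlen : R < srt.length := lt_of_lt_of_le hc hL_le
    have h1 := hL_lt R hRlen hc
    have h2 := hR_ge R hRlen (le_refl _)
    omega
  have hcnt : srt.count t = R - L := by
    refine count_eq_of_window srt t L R hLR hR_le ?_
    intro j hj
    constructor
    · intro he
      refine ⟨?_, ?_⟩
      · by_contra hc
        push_neg at hc
        have := hL_lt j hj hc
        omega
      · by_contra hc
        push_neg at hc
        have := hR_ge j hj hc
        omega
    · rintro ⟨h1, h2⟩
      have := hL_ge j hj h1
      have := hR_lt j hj h2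
      omega
  have hperm : srt.Perm s := PySem.List.sorted_perm s (fun x => x) false
  rw [← hperm.count_eq t, hcnt]

-- ===== VERDICT (by name: the statement is the Claim_ definition above) =====
theorem constrainedMatchPair_spec : Claim_equal_constrainedMatchPair := by
  intro f s len _
  unfold Spec_constrainedMatchPair constrainedMatchPair constrainedMatchPair_alt
  refine (foldl_step_congr f _ _ [] (fun ans n _ => ?_)).symm
  show ans ++ List.replicate _ n = _
  rw [bisect_diff_eq_count, ← inner_scan_eq_replicate]
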